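-- pv_equiv track=rewrite | github.com/bengfarrell/strumboli | server/discovery/discover_device.py | _analyze_interface_characteristics
-- ===== SOURCE A (Python) =====
-- from typing import Dict, Any, List, Tuple, Optional
--
-- def _analyze_interface_characteristics(samples: List[List[int]]) -> Dict[str, bool]:
--     """Analyze samples to determine what the interface does"""
--     if not samples or len(samples) < 3:
--         return {
--             'has_coordinates': False,
--             'has_buttons': False,
--             'has_varying_pressure': False,
--             'is_event_based': True
--         }
--
--     characteristics = {
--         'has_coordinates': False,
--         'has_buttons': False,
--         'has_varying_pressure': False,
--         'is_event_based': len(samples) < 50  # Few samples = event-based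
--     }
--
--     # Check for coordinates (high variance in certain bytes = X/Y movement)
--     if len(samples) >= 5:
--         for byte_idx in range(2, min(8, len(samples[0]))):
--             values = [s[byte_idx] for s in samples if len(s) > byte_idx]
--             if values and (max(values) - min(values)) > 20:
--                 characteristics['has_coordinates'] = True
--                 break
--
--     # Check for button patterns (bit flags)
--     for byte_idx in range(1, min(4, len(samples[0]) if samples else 0)):
--         values = [s[byte_idx] for s in samples if len(s) > byte_idx]
--         unique_values = set(values)
--         # Button byte often has powers of 2 or combinations
--         if len(unique_values) >= 2:
--             # Check if values look like bit flags (1, 2, 4, 8, 16, etc.)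
--             bit_like = sum(1 for v in unique_values if v in [1, 2, 4, 8, 16, 32, 64, 128])
--             if bit_like >= 2:
--                 characteristics['has_buttons'] = True
--                 break
--
--     # Check for varying pressure (16-bit values that increase/decrease)
--     if len(samples) >= 5:
--         for byte_idx in range(4, min(10, len(samples[0]) if samples else 0)):
--             if byte_idx + 1 < len(samples[0] if samples else []):
--                 values = [s[byte_idx] + (s[byte_idx+1] << 8) for s in samples
--                          if len(s) > byte_idx + 1]
--                 if values:
--                     val_range = max(values) - min(values)
--                     # Pressure has significant range
--                     if val_range > 100 and min(values) < max(values) * 0.5: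
--                         characteristics['has_varying_pressure'] = True
--                         break
--
--     return characteristics
-- ===== SOURCE B (Python) =====
-- from typing import Dict, Any, List, Tuple, Optional
--
-- def _analyze_interface_characteristics(samples: List[List[int]]) -> Dict[str, bool]:
--     """Analyze samples to determine what the interface does.
--     Single pass over the samples building per-byte-index columns, then
--     constant-size checks per column (instead of one scan of `samples`
--     per byte index)."""
--     if not samples or len(samples) < 3:
--         return {
--             'has_coordinates': False,
--             'has_buttons': False,
--             'has_varying_pressure': False,
--             'is_event_based': True
--         }
--
--     n0 = len(samples[0])
--     hi = min(10, n0)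
--     cols = [[] for _ in range(hi)]    # cols[i]  = values of byte i
--     pairs = [[] for _ in range(hi)]   # pairs[i] = 16-bit little-endian values at (i, i+1)
--     for s in samples:
--         L = len(s)
--         for i in range(1, hi):
--             if i < L:
--                 cols[i].append(s[i])
--             if 4 <= i and i + 1 < n0 and i + 1 < L:
--                 pairs[i].append(s[i] + (s[i + 1] << 8))
--
--     def spread(vs):
--         return max(vs) - min(vs) if vs else -1
--
--     POW2 = (1, 2, 4, 8, 16, 32, 64, 128)
--
--     def buttonish(vs):
--         u = set(vs)
--         return len(u) >= 2 and len([v for v in u if v in POW2]) >= 2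
--
--     def pressureish(vs):
--         return bool(vs) and max(vs) - min(vs) > 100 and min(vs) < max(vs) * 0.5
--
--     many = len(samples) >= 5
--     return {
--         'has_coordinates': many and any(spread(cols[i]) > 20
--                                         for i in range(2, min(8, n0))),
--         'has_buttons': any(buttonish(cols[i]) for i in range(1, min(4, n0))),
--         'has_varying_pressure': many and any(i + 1 < n0 and pressureish(pairs[i])
--                                              for i in range(4, hi)),
--         'is_event_based': len(samples) < 50
--     }
-- ===== Notes on version B (the rewrite author's own statement) =====
-- stated objective: alternative
-- what changed: B makes a single pass over `samples` building per-byte-index columns (and 16-bit pair columns), then decides each flag with constant-size per-column checks, instead of A's three separate loops each re-scanning all samples per byte index.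
import Mathlib
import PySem

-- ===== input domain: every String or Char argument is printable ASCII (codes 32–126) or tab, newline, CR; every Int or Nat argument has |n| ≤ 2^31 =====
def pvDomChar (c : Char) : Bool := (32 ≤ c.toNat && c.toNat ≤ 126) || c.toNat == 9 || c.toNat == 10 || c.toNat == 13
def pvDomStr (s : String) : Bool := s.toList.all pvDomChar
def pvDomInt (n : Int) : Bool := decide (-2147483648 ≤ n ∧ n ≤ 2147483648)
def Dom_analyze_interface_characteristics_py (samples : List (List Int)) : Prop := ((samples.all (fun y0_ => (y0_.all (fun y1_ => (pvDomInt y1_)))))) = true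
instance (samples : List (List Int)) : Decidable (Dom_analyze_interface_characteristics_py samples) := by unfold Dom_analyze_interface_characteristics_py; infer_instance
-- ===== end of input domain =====

-- B replaces A's per-byte-index rescans of `samples` with a single pass building
-- per-index columns, then constant-size checks per column (objective: alternative decomposition).
-- Python's float test `min(values) < max(values)*0.5` is ported as `2*min < max` in BOTH ports:
-- exact on the stated domain (|value| ≤ 257·2^31 < 2^53, so the float halving and comparison are exact).

-- ===== PORT A =====
-- s[i] + (s[i+1] << 8)  (little-endian 16-bit read; used by both ports)
def pvLE16 (s : List Int) (i : Nat) : Int := s.getD i 0 + ((s.getD (i+1) 0) <<< (8:Nat) : Int)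

-- literal transliteration of _analyze_interface_characteristics; each `for … break` that only
-- sets a flag and breaks is the corresponding `List.any` over the same Python range;
-- s[i] under the guard i < len(s) (i ≥ 0) is s.getD i 0.
def analyze_interface_characteristics_py (samples : List (List Int)) : List (String × Bool) :=
  if samples.isEmpty || samples.length < 3 then
    [("has_coordinates", false), ("has_buttons", false),
     ("has_varying_pressure", false), ("is_event_based", true)]
  else
    -- samples is nonempty here, so samples[0] = samples.headD []
    let n0 := (samples.headD []).length
    let hasCoord :=
      if 5 ≤ samples.length then
        (List.range' 2 (min 8 n0 - 2)).any (fun i =>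
          let values := (samples.filter (fun s => decide (i < s.length))).map (fun s => s.getD i 0)
          !values.isEmpty &&
            decide (20 < (PySem.List.max? values (fun y => y)).getD 0
                          - (PySem.List.min? values (fun y => y)).getD 0))
      else false
    let hasButtons :=
      (List.range' 1 (min 4 n0 - 1)).any (fun i =>
        let values := (samples.filter (fun s => decide (i < s.length))).map (fun s => s.getD i 0)
        let uniqueValues := PySem.Set.ofList values
        decide (2 ≤ uniqueValues.length) &&
          -- bit_like = sum(1 for v in unique_values if v in [1,2,4,8,16,32,64,128])
          decide (2 ≤ uniqueValues.foldl
            (fun acc v => if v ∈ ([1,2,4,8,16,32,64,128] : List Int) then acc + 1 else acc) (0:Int)))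
    let hasPressure :=
      if 5 ≤ samples.length then
        (List.range' 4 (min 10 n0 - 4)).any (fun i =>
          if i + 1 < n0 then
            let values := (samples.filter (fun s => decide (i + 1 < s.length))).map
              (fun s => pvLE16 s i)
            !values.isEmpty &&
              decide (100 < (PySem.List.max? values (fun y => y)).getD 0
                            - (PySem.List.min? values (fun y => y)).getD 0) &&
              decide (2 * (PySem.List.min? values (fun y => y)).getD 0
                        < (PySem.List.max? values (fun y => y)).getD 0)
          else false)
      else false
    [("has_coordinates", hasCoord), ("has_buttons", hasButtons),
     ("has_varying_pressure", hasPressure), ("is_event_based", decide (samples.length < 50))]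

-- ===== PORT B =====
-- one sample of Source B's single pass: update cols (byte values) and pairs (16-bit values)
def pvStepB (n0 : Nat) (st : List (List Int) × List (List Int)) (s : List Int) :
    List (List Int) × List (List Int) :=
  (st.1.mapIdx (fun i b => if 1 ≤ i ∧ i < s.length then b ++ [s.getD i 0] else b),
   st.2.mapIdx (fun i b =>
     if 4 ≤ i ∧ i + 1 < n0 ∧ i + 1 < s.length then b ++ [pvLE16 s i]
     else b))

def analyze_interface_characteristics_py_alt (samples : List (List Int)) : List (String × Bool) :=
  if samples.isEmpty || samples.length < 3 then
    [("has_coordinates", false), ("has_buttons", false),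
     ("has_varying_pressure", false), ("is_event_based", true)]
  else
    let n0 := (samples.headD []).length
    let hi := min 10 n0
    let st := samples.foldl (pvStepB n0) (List.replicate hi [], List.replicate hi [])
    let spread := fun (vs : List Int) =>
      if vs.isEmpty then (-1 : Int)
      else (PySem.List.max? vs (fun y => y)).getD 0 - (PySem.List.min? vs (fun y => y)).getD 0
    let buttonish := fun (vs : List Int) =>
      let u := PySem.Set.ofList vs
      decide (2 ≤ u.length) &&
        decide (2 ≤ ((u.filter (fun v => v ∈ ([1,2,4,8,16,32,64,128] : List Int))).length : Int))
    let pressureish := fun (vs : List Int) =>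
      !vs.isEmpty &&
        decide (100 < (PySem.List.max? vs (fun y => y)).getD 0
                      - (PySem.List.min? vs (fun y => y)).getD 0) &&
        decide (2 * (PySem.List.min? vs (fun y => y)).getD 0
                  < (PySem.List.max? vs (fun y => y)).getD 0)
    let many := decide (5 ≤ samples.length)
    [("has_coordinates",
       many && (List.range' 2 (min 8 n0 - 2)).any (fun i => decide (20 < spread (st.1.getD i [])))),
     ("has_buttons",
       (List.range' 1 (min 4 n0 - 1)).any (fun i => buttonish (st.1.getD i []))),
     ("has_varying_pressure",
       many && (List.range' 4 (hi - 4)).any (fun i => decide (i + 1 < n0) && pressureish (st.2.getD i []))),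
     ("is_event_based", decide (samples.length < 50))]

-- ===== PRECONDITION & SPEC =====
def Spec_analyze_interface_characteristics_py (samples : List (List Int)) (out : List (String × Bool)) : Prop := out = analyze_interface_characteristics_py_alt samples
instance (samples : List (List Int)) (out : List (String × Bool)) : Decidable (Spec_analyze_interface_characteristics_py samples out) := by unfold Spec_analyze_interface_characteristics_py; infer_instance

-- ===== CLAIM (what is proved, stated in full; the proofs are below) =====
def Claim_equal_analyze_interface_characteristics_py : Prop := ∀ (samples : List (List Int)), Dom_analyze_interface_characteristics_py samples → Spec_analyze_interface_characteristics_py samples (analyze_interface_characteristics_py samples)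

-- ===== LEMMAS AND PROOFS =====

-- A's comprehension [s[i] for s in samples if len(s) > i]
def pvColA (samples : List (List Int)) (i : Nat) : List Int :=
  (samples.filter (fun s => decide (i < s.length))).map (fun s => s.getD i 0)

-- A's comprehension [s[i] + (s[i+1] << 8) for s in samples if len(s) > i+1]
def pvPairA (samples : List (List Int)) (i : Nat) : List Int :=
  (samples.filter (fun s => decide (i + 1 < s.length))).map
    (fun s => pvLE16 s i)

theorem pvGetD_mapIdx (l : List (List Int)) (f : Nat → List Int → List Int) (i : Nat)
    (h : i < l.length) : (l.mapIdx f).getD i [] = f i (l.getD i []) := by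
  rw [List.getD_eq_getElem _ _ (by simpa using h), List.getD_eq_getElem _ _ h]
  simp

theorem pvStepB_len (n0 : Nat) (st : List (List Int) × List (List Int)) (s : List Int) :
    (pvStepB n0 st s).1.length = st.1.length ∧ (pvStepB n0 st s).2.length = st.2.length := by
  simp [pvStepB]

theorem pvFoldB_fst (n0 : Nat) (samples : List (List Int)) :
    ∀ (st : List (List Int) × List (List Int)) (i : Nat), 1 ≤ i → i < st.1.length →
      (samples.foldl (pvStepB n0) st).1.getD i [] = st.1.getD i [] ++ pvColA samples i := by
  induction samples with
  | nil => intro st i _ _; simp [pvColA]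
  | cons s rest ih =>
    intro st i h1 h2
    have hlen := (pvStepB_len n0 st s).1
    rw [List.foldl_cons, ih (pvStepB n0 st s) i h1 (by omega)]
    have hmap := pvGetD_mapIdx st.1
      (fun i b => if 1 ≤ i ∧ i < s.length then b ++ [s.getD i 0] else b) i h2
    rw [show (pvStepB n0 st s).1
        = st.1.mapIdx (fun i b => if 1 ≤ i ∧ i < s.length then b ++ [s.getD i 0] else b) from rfl,
      hmap]
    by_cases hc : i < s.length
    · simp [pvColA, hc, h1, List.append_assoc]
    · simp [pvColA, hc]

theorem pvFoldB_snd (n0 : Nat) (samples : List (List Int)) :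
    ∀ (st : List (List Int) × List (List Int)) (i : Nat), 4 ≤ i → i + 1 < n0 → i < st.2.length →
      (samples.foldl (pvStepB n0) st).2.getD i [] = st.2.getD i [] ++ pvPairA samples i := by
  induction samples with
  | nil => intro st i _ _ _; simp [pvPairA]
  | cons s rest ih =>
    intro st i h4 hn h2
    have hlen := (pvStepB_len n0 st s).2
    rw [List.foldl_cons, ih (pvStepB n0 st s) i h4 hn (by omega)]
    have hmap := pvGetD_mapIdx st.2
      (fun i b => if 4 ≤ i ∧ i + 1 < n0 ∧ i + 1 < s.length
        then b ++ [pvLE16 s i] else b) i h2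
    rw [show (pvStepB n0 st s).2
        = st.2.mapIdx (fun i b => if 4 ≤ i ∧ i + 1 < n0 ∧ i + 1 < s.length
            then b ++ [pvLE16 s i] else b) from rfl,
      hmap]
    by_cases hc : i + 1 < s.length
    · simp [pvPairA, hc, h4, hn, List.append_assoc]
    · simp [pvPairA, hc]

-- sum(1 for v in u if v in pows) = len([v for v in u if v in pows])
theorem pvCountFold (u pows : List Int) :
    u.foldl (fun acc v => if v ∈ pows then acc + 1 else acc) (0:Int)
      = ((u.filter (fun v => v ∈ pows)).length : Int) := by
  simp [PySem.List.foldl_ite_eq_foldl_filter, PySem.List.foldl_add]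

-- `spread vs > 20` ⟺ A's `values and max-min > 20`
theorem pvSpread_gt (vs : List Int) (c : Int) (hc : -1 ≤ c) :
    (decide (c < (if vs.isEmpty then (-1 : Int)
      else (PySem.List.max? vs (fun y => y)).getD 0 - (PySem.List.min? vs (fun y => y)).getD 0)))
    = (!vs.isEmpty && decide (c < (PySem.List.max? vs (fun y => y)).getD 0
                                  - (PySem.List.min? vs (fun y => y)).getD 0)) := by
  by_cases h : vs.isEmpty
  · simp [h]; omega
  · simp [h]

theorem pvGetD_replicate (n i : Nat) : (List.replicate n ([] : List Int)).getD i [] = [] := by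
  rcases Nat.lt_or_ge i n with h | h
  · rw [List.getD_eq_getElem _ _ (by simpa using h)]; simp
  · rw [List.getD_eq_default _ _ (by simpa using h)]

-- ===== VERDICT (by name: the statement is the Claim_ definition above) =====
theorem analyze_interface_characteristics_py_spec : Claim_equal_analyze_interface_characteristics_py := by
  intro samples _
  unfold Spec_analyze_interface_characteristics_py
  unfold analyze_interface_characteristics_py analyze_interface_characteristics_py_alt
  by_cases hsmall : samples.isEmpty || samples.length < 3
  · simp [hsmall]
  · rw [if_neg hsmall, if_neg hsmall]
    set n0 := (samples.headD []).length with hn0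
    have hcol : ∀ i : Nat, 1 ≤ i → i < min 10 n0 →
        ((samples.foldl (pvStepB n0)
          (List.replicate (min 10 n0) [], List.replicate (min 10 n0) [])).1.getD i [])
          = pvColA samples i := by
      intro i h1 h2
      have h2' : i < (List.replicate (min 10 n0) ([] : List Int)).length := by simpa using h2
      rw [pvFoldB_fst n0 samples
        (List.replicate (min 10 n0) [], List.replicate (min 10 n0) []) i h1 h2',
        pvGetD_replicate, List.nil_append]
    have hpair : ∀ i : Nat, 4 ≤ i → i + 1 < n0 → i < min 10 n0 →
        ((samples.foldl (pvStepB n0)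
          (List.replicate (min 10 n0) [], List.replicate (min 10 n0) [])).2.getD i [])
          = pvPairA samples i := by
      intro i h4 hn h2
      have h2' : i < (List.replicate (min 10 n0) ([] : List Int)).length := by simpa using h2
      rw [pvFoldB_snd n0 samples
        (List.replicate (min 10 n0) [], List.replicate (min 10 n0) []) i h4 hn h2',
        pvGetD_replicate, List.nil_append]
    refine List.ext_getElem (by simp) ?_
    intro k hk1 hk2
    match k with
    | 0 =>
      -- has_coordinates
      simp only [List.getElem_cons_zero]
      refine Prod.ext rfl ?_
      have : ∀ i ∈ List.range' 2 (min 8 n0 - 2),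
          (decide (20 < (if (pvColA samples i).isEmpty then (-1:Int)
              else (PySem.List.max? (pvColA samples i) (fun y => y)).getD 0
                   - (PySem.List.min? (pvColA samples i) (fun y => y)).getD 0)))
          = (!(pvColA samples i).isEmpty &&
             decide (20 < (PySem.List.max? (pvColA samples i) (fun y => y)).getD 0
                          - (PySem.List.min? (pvColA samples i) (fun y => y)).getD 0)) :=
        fun i _ => pvSpread_gt (pvColA samples i) 20 (by omega)
      by_cases h5 : 5 ≤ samples.length
      · simp only [h5, if_true, decide_true, Bool.true_and]
        refine (PySem.List.any_congr_mem ?_).symm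
        intro i hi
        have hmem := List.mem_range'_1.mp hi
        have h1 : 1 ≤ i := by omega
        have h2 : i < min 10 n0 := by omega
        rw [hcol i h1 h2, this i hi]
        rfl
      · simp [h5]
    | 1 =>
      -- has_buttons
      simp only [List.getElem_cons_succ, List.getElem_cons_zero]
      refine Prod.ext rfl ?_
      refine (PySem.List.any_congr_mem ?_).symm
      intro i hi
      have hmem := List.mem_range'_1.mp hi
      rw [hcol i (by omega) (by omega)]
      rw [pvCountFold]
      rfl
    | 2 =>
      -- has_varying_pressure
      simp only [List.getElem_cons_succ, List.getElem_cons_zero]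
      refine Prod.ext rfl ?_
      by_cases h5 : 5 ≤ samples.length
      · simp only [h5, if_true, decide_true, Bool.true_and]
        refine (PySem.List.any_congr_mem ?_).symm
        intro i hi
        have hmem := List.mem_range'_1.mp hi
        by_cases hn : i + 1 < n0
        · rw [hpair i (by omega) hn (by omega), if_pos hn]
          simp only [hn, decide_true, Bool.true_and]
          rfl
        · simp [hn]
      · simp [h5]
    | 3 =>
      simp
    | (n+4) =>
      exact absurd (by simpa using hk2) (by omega)
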